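-- pv_equiv track=rewrite | github.com/sergey-tinyaev/programming-challenges-cHJvamVjdGV1bGVy | p872/p872q.py | solve
-- ===== SOURCE A (Python) =====
-- def solve(n: int, k: int) -> int:
--     """Return sum of nodes in path from root to target node in rooted trees."""
--     # Time: O(log(n-k)).
--     # Space: O(1).
--     diff, result, power = n - k, n, 1
--     while diff:
--         diff, is_on_path = divmod(diff, 2)
--         if is_on_path:
--             n -= power
--             result += n
--         power <<= 1
--     return result
-- ===== SOURCE B (Python) =====
-- def solve(n: int, k: int) -> int:
--     """Return sum of nodes in path from root to target node in rooted trees."""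
--     # Count-then-weight decomposition: collect the set-bit place values of
--     # n - k (LSB first), then result = n*(m+1) - sum of value*(descending weight).
--     diff = n - k
--     bits = []
--     power = 1
--     while diff > 0:
--         diff, r = divmod(diff, 2)
--         if r:
--             bits.append(power)
--         power <<= 1
--     m = len(bits)
--     total = 0
--     w = m
--     for v in bits:
--         total += v * w
--         w -= 1
--     return n * (m + 1) - total
-- ===== Notes on version B (the rewrite author's own statement) =====
-- stated objective: alternative
-- what changed: Replaces A's single loop with a running decremented n and cumulative result by a count-then-weight decomposition: one pass collects the set-bit place values of n-k (LSB first), a second pass forms a rank-weighted sum, and the answer is the closed form n*(m+1) minus that sum.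
import Mathlib
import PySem

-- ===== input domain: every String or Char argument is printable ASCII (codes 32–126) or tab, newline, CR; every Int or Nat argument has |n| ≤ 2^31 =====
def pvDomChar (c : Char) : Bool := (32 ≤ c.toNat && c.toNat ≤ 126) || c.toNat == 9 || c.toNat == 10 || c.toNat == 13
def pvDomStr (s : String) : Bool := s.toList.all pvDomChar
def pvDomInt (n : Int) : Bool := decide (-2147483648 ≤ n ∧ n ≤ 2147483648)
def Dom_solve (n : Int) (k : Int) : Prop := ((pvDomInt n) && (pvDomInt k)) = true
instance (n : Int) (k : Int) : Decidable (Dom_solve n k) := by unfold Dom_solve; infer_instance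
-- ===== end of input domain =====

-- B replaces A's running-accumulator loop by a count-then-weight decomposition (collect set-bit values, then a rank-weighted closed form); alternative, same cost.


-- ===== PORT A =====
-- A's `while diff:` loop; exact for diff ≥ 0 (Pre_). For diff < 0 the Python loop
-- never terminates (floored halving of a negative never reaches 0), so those inputs
-- are outside Pre_ and the loop here simply stops.
def solveLoopA (diff n result power : Int) : Int :=
  if h : diff ≤ 0 then result
  else
    let q := PySem.Int.floordiv diff 2
    let r := PySem.Int.mod diff 2
    if r ≠ 0 then solveLoopA q (n - power) (result + (n - power)) (power * 2)
    else solveLoopA q n result (power * 2)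
termination_by diff.toNat
decreasing_by
  all_goals
    have h2 : PySem.Int.floordiv diff 2 = diff / 2 :=
      PySem.Int.floordiv_eq_ediv_of_pos (by omega)
    simp only [h2]; omega

def solve (n : Int) (k : Int) : Int := solveLoopA (n - k) n n 1

-- ===== PORT B =====
-- first pass of Source B: collect set-bit place values of diff, LSB first
def collectBits (diff power : Int) : List Int :=
  if h : diff ≤ 0 then []
  else
    let q := PySem.Int.floordiv diff 2
    let r := PySem.Int.mod diff 2
    if r ≠ 0 then power :: collectBits q (power * 2)
    else collectBits q (power * 2)
termination_by diff.toNat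
decreasing_by
  all_goals
    have h2 : PySem.Int.floordiv diff 2 = diff / 2 :=
      PySem.Int.floordiv_eq_ediv_of_pos (by omega)
    simp only [h2]; omega

-- second pass of Source B: total += v * w; w -= 1
def wsum : List Int → Int → Int
  | [], _ => 0
  | v :: t, w => v * w + wsum t (w - 1)

def solve_alt (n : Int) (k : Int) : Int :=
  let bits := collectBits (n - k) 1
  let m : Int := bits.length
  n * (m + 1) - wsum bits m

-- ===== PRECONDITION & SPEC =====
-- Pre_ excludes k > n, on which A's `while diff` loop never returns (diverges):
-- floored halving of the negative diff stabilises at -1 and never reaches 0.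
def Pre_solve (n : Int) (k : Int) : Prop := k ≤ n
instance (n : Int) (k : Int) : Decidable (Pre_solve n k) := by unfold Pre_solve; infer_instance
def pvWitness_solve : Int × Int := (10, 3)

def Spec_solve (n : Int) (k : Int) (out : Int) : Prop := out = solve_alt n k
instance (n : Int) (k : Int) (out : Int) : Decidable (Spec_solve n k out) := by unfold Spec_solve; infer_instance

-- ===== CLAIM (what is proved, stated in full; the proofs are below) =====
def Claim_equal_solve : Prop := ∀ (n : Int) (k : Int), Dom_solve n k → Pre_solve n k → Spec_solve n k (solve n k)

-- ===== LEMMAS AND PROOFS =====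

-- loop invariant: A's loop value in terms of B's bit list and rank-weighted sum
theorem solveLoopA_eq (diff n result power : Int) (hd : 0 ≤ diff) :
    solveLoopA diff n result power =
      result + n * (collectBits diff power).length
        - wsum (collectBits diff power) (collectBits diff power).length := by
  fun_induction solveLoopA diff n result power with
  | case1 diff n result power h =>
    rw [collectBits]; simp [h, wsum]
  | case2 diff n result power h q r hr ih =>
    have hq : 0 ≤ q := by
      have h2 : PySem.Int.floordiv diff 2 = diff / 2 :=
        PySem.Int.floordiv_eq_ediv_of_pos (by omega)
      simp only [q, h2]; omega
    have hcb : collectBits diff power = power :: collectBits q (power * 2) := by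
      rw [collectBits, dif_neg h]
      show (if r ≠ 0 then power :: collectBits q (power * 2)
            else collectBits q (power * 2)) = _
      rw [if_pos hr]
    rw [hcb, ih hq]
    simp only [List.length_cons, wsum]
    push_cast; ring
  | case3 diff n result power h q r hr ih =>
    have hq : 0 ≤ q := by
      have h2 : PySem.Int.floordiv diff 2 = diff / 2 :=
        PySem.Int.floordiv_eq_ediv_of_pos (by omega)
      simp only [q, h2]; omega
    have hcb : collectBits diff power = collectBits q (power * 2) := by
      rw [collectBits, dif_neg h]
      show (if r ≠ 0 then power :: collectBits q (power * 2)
            else collectBits q (power * 2)) = _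
      rw [if_neg (by simp [hr])]
    rw [hcb]
    exact ih hq

-- ===== VERDICT (by name: the statement is the Claim_ definition above) =====
theorem solve_spec : Claim_equal_solve := by
  intro n k _ hpre
  unfold Spec_solve solve solve_alt
  rw [solveLoopA_eq (n - k) n n 1 (by unfold Pre_solve at hpre; omega)]
  ring
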